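-- pv_equiv track=rewrite | github.com/charliezou/nscf | commonlayer.py | get_session_list
-- ===== SOURCE A (Python) =====
-- def get_session_list(ts):
--     s=0
--     t=-1
--     sessionList = []
--     for i in range(len(ts)):
--         if i==0:
--             t = ts[i]
--         elif t != ts[i]:
--             s = s+1
--             t = ts[i]
--         sessionList.append(s)
--     return sessionList
-- ===== SOURCE B (Python) =====
-- def get_session_list(ts):
--     sessionList = []
--     run_id = 0
--     i = 0
--     n = len(ts)
--     while i < n:
--         j = i + 1
--         while j < n and ts[j] == ts[i]:
--             j += 1
--         sessionList.extend([run_id] * (j - i))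
--         run_id += 1
--         i = j
--     return sessionList
-- ===== Notes on version B (the rewrite author's own statement) =====
-- stated objective: alternative
-- what changed: Replaces A's single index loop with inline previous-value tracking and counter increments by a run-at-a-time scan: find where each run of consecutive equal values ends, then emit that run's id repeated for the run's length.
import Mathlib
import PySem

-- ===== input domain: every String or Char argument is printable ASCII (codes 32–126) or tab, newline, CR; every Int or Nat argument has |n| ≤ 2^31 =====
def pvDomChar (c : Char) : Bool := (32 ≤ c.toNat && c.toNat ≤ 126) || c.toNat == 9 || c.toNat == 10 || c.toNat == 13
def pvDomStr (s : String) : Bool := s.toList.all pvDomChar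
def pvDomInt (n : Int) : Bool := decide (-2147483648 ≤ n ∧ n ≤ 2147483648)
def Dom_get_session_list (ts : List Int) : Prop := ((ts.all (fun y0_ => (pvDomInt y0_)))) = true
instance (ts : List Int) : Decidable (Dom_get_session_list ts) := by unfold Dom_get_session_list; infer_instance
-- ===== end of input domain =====

-- B replaces A's inline previous-value/counter loop by a run-at-a-time scan (find each run's end, emit its id repeated); alternative decomposition, same cost.

-- ===== PORT A =====
-- literal port: for i in range(len(ts)); ts[i] is always in range, pyGetD's default is never used
def get_session_list (ts : List Int) : List Int :=
  ((PySem.List.pyRange 0 ts.length 1).foldl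
    (fun (st : Int × Int × List Int) i =>
      if i == 0 then (st.1, PySem.List.pyGetD ts i 0, st.2.2 ++ [st.1])
      else if st.2.1 != PySem.List.pyGetD ts i 0 then
        (st.1 + 1, PySem.List.pyGetD ts i 0, st.2.2 ++ [st.1 + 1])
      else (st.1, st.2.1, st.2.2 ++ [st.1]))
    (0, -1, [])).2.2

-- ===== PORT B =====
-- outer while loop = recursion on the remaining list; inner while (scan to the run's end) = span
def altRun : List Int → Int → List Int
  | [], _ => []
  | x :: xs, rid =>
    let p := xs.span (fun y => y == x)
    List.replicate (p.1.length + 1) rid ++ altRun p.2 (rid + 1)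
  termination_by xs _ => xs.length
  decreasing_by
    simp only [List.span_eq_takeWhile_dropWhile]
    exact Nat.lt_succ_of_le (List.length_dropWhile_le _ _)

def get_session_list_alt (ts : List Int) : List Int := altRun ts 0

-- ===== PRECONDITION & SPEC =====
def Spec_get_session_list (ts : List Int) (out : List Int) : Prop := out = get_session_list_alt ts
instance (ts : List Int) (out : List Int) : Decidable (Spec_get_session_list ts out) := by unfold Spec_get_session_list; infer_instance

-- ===== CLAIM (what is proved, stated in full; the proofs are below) =====
def Claim_equal_get_session_list : Prop := ∀ (ts : List Int), Dom_get_session_list ts → Spec_get_session_list ts (get_session_list ts)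

-- ===== LEMMAS AND PROOFS =====

-- the value-level step of A's loop, after the i == 0 iteration
def aStep (st : Int × Int × List Int) (y : Int) : Int × Int × List Int :=
  if st.2.1 = y then (st.1, st.2.1, st.2.2 ++ [st.1]) else (st.1 + 1, y, st.2.2 ++ [st.1 + 1])

-- the sessions emitted for the tail, given current id s and current run value t
def tailB : List Int → Int → Int → List Int
  | [], _, _ => []
  | y :: ys, s, t => if y == t then s :: tailB ys s t else (s + 1) :: tailB ys (s + 1) y

lemma foldl_aStep (xs : List Int) : ∀ (s t : Int) (acc : List Int),
    (xs.foldl aStep (s, t, acc)).2.2 = acc ++ tailB xs s t := by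
  induction xs with
  | nil => intro s t acc; simp [tailB]
  | cons y ys ih =>
    intro s t acc
    by_cases h : y = t
    · simp [aStep, tailB, h, ih]
    · simp [aStep, tailB, h, Ne.symm h, ih]

lemma tailB_run (xs : List Int) : ∀ (s t : Int),
    tailB xs s t = List.replicate (xs.takeWhile (fun y => y == t)).length s
      ++ tailB (xs.dropWhile (fun y => y == t)) s t := by
  induction xs with
  | nil => intro s t; simp [tailB]
  | cons y ys ih =>
    intro s t
    by_cases h : y = t
    · simp [tailB, h, List.replicate_succ, ih]
    · simp [tailB, h]

lemma altRun_eq_tailB (n : Nat) : ∀ (xs : List Int), xs.length ≤ n → ∀ (t s : Int),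
    altRun (t :: xs) s = s :: tailB xs s t := by
  induction n with
  | zero =>
    intro xs h t s
    have : xs = [] := List.eq_nil_of_length_eq_zero (Nat.le_zero.mp h)
    subst this
    simp [altRun, tailB]
  | succ n ih =>
    intro xs h t s
    rw [altRun]
    simp only [List.span_eq_takeWhile_dropWhile, List.replicate_succ]
    rw [tailB_run xs s t]
    cases hd : xs.dropWhile (fun y => y == t) with
    | nil => simp [altRun, tailB]
    | cons y ys =>
      have hy : (y == t) = false := by
        have h' := List.head?_dropWhile_not (fun z => z == t) xs
        rw [hd] at h'; simpa using h'
      have hlen : ys.length ≤ n := by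
        have := List.length_dropWhile_le (fun y => y == t) xs
        rw [hd] at this; simp at this; omega
      simp [tailB, hy, List.cons_append]
      exact ih ys hlen y (s + 1)

lemma A_eq_B (ts : List Int) : get_session_list ts = get_session_list_alt ts := by
  cases ts with
  | nil => simp [get_session_list, get_session_list_alt, altRun]
  | cons x xs =>
    unfold get_session_list
    have hlen : (0 : Int) < (x :: xs).length := by simp
    rw [PySem.List.pyRange_one_cons hlen]
    simp only [List.foldl_cons]
    norm_num
    -- the i == 0 branch never fires for i ∈ pyRange 1 len 1
    have hcongr : (PySem.List.pyRange 1 ((xs.length : Int) + 1) 1).foldl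
        (fun (st : Int × Int × List Int) i =>
          if i = 0 then (st.1, PySem.List.pyGetD (x :: xs) i 0, st.2.2 ++ [st.1])
          else if st.2.1 = PySem.List.pyGetD (x :: xs) i 0 then (st.1, st.2.1, st.2.2 ++ [st.1])
          else (st.1 + 1, PySem.List.pyGetD (x :: xs) i 0, st.2.2 ++ [st.1 + 1]))
        (0, x, [0])
      = (PySem.List.pyRange 1 ((xs.length : Int) + 1) 1).foldl
        (fun st i => aStep st (PySem.List.pyGetD (x :: xs) i 0))
        (0, x, [0]) := by
      apply PySem.List.foldl_congr_mem
      intro st i hi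
      have h1 : (1 : Int) ≤ i := (PySem.List.mem_pyRange_one.mp hi).1
      have h0 : ¬ (i = 0) := by omega
      simp [h0, aStep]
    rw [hcongr]
    have hb : ((xs.length : Int) + 1) = ((x :: xs).length : Int) := by simp
    rw [hb, PySem.List.foldl_pyRange_pyGetD' (x :: xs) 0 aStep (0, x, [0])
      (by norm_num : (0:Int) ≤ 1)]
    simp only [Int.toNat_one, List.drop_one, List.tail_cons]
    rw [foldl_aStep]
    unfold get_session_list_alt
    rw [altRun_eq_tailB xs.length xs le_rfl x 0]
    simp

-- ===== VERDICT (by name: the statement is the Claim_ definition above) =====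
theorem get_session_list_spec : Claim_equal_get_session_list := by
  intro ts _
  unfold Spec_get_session_list
  exact A_eq_B ts
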